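-- pv_equiv track=rewrite | github.com/WoongJKIM/simulation | delivery_rider_simulation/dependencies/make_bundle.py | set_trans_candidate_list
-- ===== SOURCE A (Python) =====
-- import math
--
-- def set_trans_candidate_list(candidate_list):
--
--     candidate_len = len(candidate_list[0])
--     t_candidate_len = candidate_len + math.floor(candidate_len / 2)
--
--     cand_seq_list = candidate_list[0]
--     cand_bun_list = candidate_list[1]
--
--     b_slot = 0
--     b_val = 0
--     a_slot = len(cand_seq_list)
--     trans_candidate_list = []
--
--     for a_slot in cand_bun_list:
--         trans_candidate_list.extend(cand_seq_list[b_slot : a_slot - b_val].copy())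
--         trans_candidate_list.append(-1)
--
--         b_slot = a_slot - b_val
--         b_val += 1
--
--     trans_candidate_list.extend(cand_seq_list[b_slot : len(cand_seq_list)])
--     trans_candidate_list.extend([-1 for _ in range((t_candidate_len) - len(trans_candidate_list))])
--
--     return trans_candidate_list
-- ===== SOURCE B (Python) =====
-- def set_trans_candidate_list(candidate_list):
--     seq = candidate_list[0]
--     target_len = len(seq) + len(seq) // 2
--
--     def build(bun, j, start):
--         if not bun:
--             return seq[start:]
--         cut = bun[0] - j
--         return seq[start:cut] + [-1] + build(bun[1:], j + 1, cut)
--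
--     out = build(candidate_list[1], 0, 0)
--     return out + [-1] * (target_len - len(out))
-- ===== Notes on version B (the rewrite author's own statement) =====
-- stated objective: simpler
-- what changed: Replaces A's imperative loop with mutable b_slot/b_val offset state and repeated in-place extends by a pure recursion over the bundle list that passes the next cut position along and builds the result by concatenation, with padding via list multiplication.
import Mathlib
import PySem

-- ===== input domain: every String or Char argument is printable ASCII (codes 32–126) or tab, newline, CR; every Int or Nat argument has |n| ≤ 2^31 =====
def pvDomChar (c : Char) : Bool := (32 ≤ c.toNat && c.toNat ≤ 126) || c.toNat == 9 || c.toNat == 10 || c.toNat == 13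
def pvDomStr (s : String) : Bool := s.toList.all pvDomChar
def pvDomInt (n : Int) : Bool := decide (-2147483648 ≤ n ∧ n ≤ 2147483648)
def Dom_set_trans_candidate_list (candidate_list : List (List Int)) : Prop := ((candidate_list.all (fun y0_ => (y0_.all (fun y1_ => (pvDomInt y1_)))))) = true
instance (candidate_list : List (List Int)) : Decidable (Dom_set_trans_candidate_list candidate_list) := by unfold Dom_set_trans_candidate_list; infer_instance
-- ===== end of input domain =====

-- B replaces A's imperative loop over mutable offset state (b_slot/b_val) and in-place
-- extends by a pure recursion over the bundle list (simpler decomposition; same cost).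

-- ===== PORT A =====
-- A's loop body: state (b_slot, b_val, trans_candidate_list); one step per a_slot in cand_bun_list.
def pvStepA (seq : List Int) (st : Int × Int × List Int) (a : Int) : Int × Int × List Int :=
  (a - st.2.1, st.2.1 + 1,
   st.2.2 ++ PySem.List.slice seq (some st.1) (some (a - st.2.1)) ++ [-1])

def set_trans_candidate_list (candidate_list : List (List Int)) : List Int :=
  let cand_seq_list := PySem.List.pyGetD candidate_list 0 []
  let candidate_len := PySem.List.len cand_seq_list
  let t_candidate_len := candidate_len + PySem.Int.floordiv candidate_len 2
  let cand_bun_list := PySem.List.pyGetD candidate_list 1 []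
  let st := cand_bun_list.foldl (pvStepA cand_seq_list) (0, 0, [])
  let tr := st.2.2 ++ PySem.List.slice cand_seq_list (some st.1) (some (PySem.List.len cand_seq_list))
  tr ++ List.replicate (t_candidate_len - PySem.List.len tr).toNat (-1)

-- ===== PORT B =====
-- Source B's recursive 'build(bun, j, start)'
def pvBuild (seq : List Int) : List Int → Int → Int → List Int
  | [], _, start => PySem.List.slice seq (some start) none
  | a :: rest, j, start =>
      PySem.List.slice seq (some start) (some (a - j)) ++ [-1] ++ pvBuild seq rest (j + 1) (a - j)

def set_trans_candidate_list_alt (candidate_list : List (List Int)) : List Int :=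
  let seq := PySem.List.pyGetD candidate_list 0 []
  let target_len := PySem.List.len seq + PySem.Int.floordiv (PySem.List.len seq) 2
  let out := pvBuild seq (PySem.List.pyGetD candidate_list 1 []) 0 0
  out ++ List.replicate (target_len - PySem.List.len out).toNat (-1)

-- ===== PRECONDITION & SPEC =====
-- A raises IndexError on candidate_list[0] / candidate_list[1] when fewer than two rows are given.
def Pre_set_trans_candidate_list (candidate_list : List (List Int)) : Prop :=
  2 ≤ candidate_list.length
instance (candidate_list : List (List Int)) : Decidable (Pre_set_trans_candidate_list candidate_list) := by unfold Pre_set_trans_candidate_list; infer_instance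

def pvWitness_set_trans_candidate_list : List (List Int) := [[1, 2, 3, 4], [2]]

def Spec_set_trans_candidate_list (candidate_list : List (List Int)) (out : List Int) : Prop := out = set_trans_candidate_list_alt candidate_list
instance (candidate_list : List (List Int)) (out : List Int) : Decidable (Spec_set_trans_candidate_list candidate_list out) := by unfold Spec_set_trans_candidate_list; infer_instance

-- ===== CLAIM (what is proved, stated in full; the proofs are below) =====
def Claim_equal_set_trans_candidate_list : Prop := ∀ (candidate_list : List (List Int)), Dom_set_trans_candidate_list candidate_list → Pre_set_trans_candidate_list candidate_list → Spec_set_trans_candidate_list candidate_list (set_trans_candidate_list candidate_list)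

-- ===== LEMMAS AND PROOFS =====

-- seq[a : len(seq)] = seq[a:]
theorem pv_slice_end_len (xs : List Int) (a : Int) :
    PySem.List.slice xs (some a) (some (xs.length : Int)) = PySem.List.slice xs (some a) none := by
  simp [PySem.List.slice, PySem.List.clampIdx]
  split_ifs <;> omega

-- A's fold, followed by the tail slice, equals acc ++ pvBuild.
theorem pv_loop (seq bun : List Int) (b j : Int) (acc : List Int) :
    (bun.foldl (pvStepA seq) (b, j, acc)).2.2 ++
      PySem.List.slice seq (some (bun.foldl (pvStepA seq) (b, j, acc)).1)
        (some (PySem.List.len seq))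
      = acc ++ pvBuild seq bun j b := by
  induction bun generalizing b j acc with
  | nil => simp [pvBuild, pv_slice_end_len]
  | cons a rest ih =>
      simp only [List.foldl_cons, pvBuild]
      rw [show pvStepA seq (b, j, acc) a
            = (a - j, j + 1, acc ++ PySem.List.slice seq (some b) (some (a - j)) ++ [-1]) from rfl]
      rw [ih]
      simp

-- ===== VERDICT (by name: the statement is the Claim_ definition above) =====
theorem set_trans_candidate_list_spec : Claim_equal_set_trans_candidate_list := by
  intro cl _ _
  unfold Spec_set_trans_candidate_list set_trans_candidate_list set_trans_candidate_list_alt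
  simp only []
  rw [pv_loop]
  simp
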